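-- pv_equiv track=rewrite | github.com/YixiWengmu/DBOC-GUI-Calculator | DBOC-gui/github_final.py | extract_quantum_numbers
-- ===== SOURCE A (Python) =====
-- def extract_quantum_numbers(primitives, primitive_mapping):
--     """Convert primitive orbital labels into (l, m, n) quantum numbers."""
--     l_values, m_values, n_values = [], [], []
--
--     for item in primitives:
--         l, m, n = primitive_mapping[item[1]]
--         l_values.append(l)
--         m_values.append(m)
--         n_values.append(n)
--
--     return l_values, m_values, n_values
-- ===== SOURCE B (Python) =====
-- def extract_quantum_numbers(primitives, primitive_mapping):
--     """Convert primitive orbital labels into (l, m, n) quantum numbers."""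
--     def column(k):
--         return [primitive_mapping[item[1]][k] for item in primitives]
--     return column(0), column(1), column(2)
-- ===== Notes on version B (the rewrite author's own statement) =====
-- stated objective: alternative
-- what changed: B makes three independent staged passes over primitives, one per quantum-number component, each extracting a single column of the mapping with a shared column(k) helper, instead of A's single pass that appends to three parallel accumulator lists.
import Mathlib
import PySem

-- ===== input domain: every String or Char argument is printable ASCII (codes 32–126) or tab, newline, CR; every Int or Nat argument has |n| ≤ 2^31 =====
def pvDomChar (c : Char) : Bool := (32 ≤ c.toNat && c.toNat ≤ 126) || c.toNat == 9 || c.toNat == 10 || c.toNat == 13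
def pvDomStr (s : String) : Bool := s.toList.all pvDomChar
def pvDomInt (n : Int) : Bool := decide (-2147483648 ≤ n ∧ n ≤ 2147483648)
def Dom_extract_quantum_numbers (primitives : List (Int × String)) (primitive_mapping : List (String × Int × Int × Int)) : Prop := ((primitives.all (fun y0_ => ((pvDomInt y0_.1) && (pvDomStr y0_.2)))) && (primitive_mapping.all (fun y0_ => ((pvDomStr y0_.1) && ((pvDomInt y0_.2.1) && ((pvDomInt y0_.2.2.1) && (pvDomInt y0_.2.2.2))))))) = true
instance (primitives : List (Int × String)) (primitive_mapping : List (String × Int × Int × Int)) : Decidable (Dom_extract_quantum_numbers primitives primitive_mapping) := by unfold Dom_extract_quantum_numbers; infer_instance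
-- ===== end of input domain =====

-- B replaces A's single pass with three parallel appends by three staged passes, one per component, via a shared column(k) helper.
-- ===== PORT A =====
-- for item in primitives: l,m,n = primitive_mapping[item[1]]; append to the three lists
def extract_quantum_numbers (primitives : List (Int × String)) (primitive_mapping : List (String × Int × Int × Int)) : List Int × List Int × List Int :=
  primitives.foldl
    (fun acc item =>
      let lmn := ((PySem.Dict.mk primitive_mapping).get? item.2).getD (0, 0, 0)
      (acc.1 ++ [lmn.1], acc.2.1 ++ [lmn.2.1], acc.2.2 ++ [lmn.2.2]))
    ([], [], [])

-- ===== PORT B =====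
-- column(k) = [primitive_mapping[item[1]][k] for item in primitives]; tuple indexing by k
def pvColumn (primitives : List (Int × String)) (primitive_mapping : List (String × Int × Int × Int)) (k : Nat) : List Int :=
  primitives.map (fun item =>
    let lmn := ((PySem.Dict.mk primitive_mapping).get? item.2).getD (0, 0, 0)
    if k = 0 then lmn.1 else if k = 1 then lmn.2.1 else lmn.2.2)

def extract_quantum_numbers_alt (primitives : List (Int × String)) (primitive_mapping : List (String × Int × Int × Int)) : List Int × List Int × List Int :=
  (pvColumn primitives primitive_mapping 0,
   pvColumn primitives primitive_mapping 1,
   pvColumn primitives primitive_mapping 2)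

-- ===== PRECONDITION & SPEC =====
-- Pre_: every primitive's label occurs in primitive_mapping (A raises KeyError otherwise).
def Pre_extract_quantum_numbers (primitives : List (Int × String)) (primitive_mapping : List (String × Int × Int × Int)) : Prop :=
  (primitives.all (fun item => (PySem.Dict.mk primitive_mapping).contains item.2)) = true
instance (primitives : List (Int × String)) (primitive_mapping : List (String × Int × Int × Int)) : Decidable (Pre_extract_quantum_numbers primitives primitive_mapping) := by unfold Pre_extract_quantum_numbers; infer_instance
def pvWitness_extract_quantum_numbers : (List (Int × String)) × (List (String × Int × Int × Int)) :=
  ([(0, "s"), (1, "px")], [("s", 0, 0, 0), ("px", 1, 0, 0)])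

def Spec_extract_quantum_numbers (primitives : List (Int × String)) (primitive_mapping : List (String × Int × Int × Int)) (out : List Int × List Int × List Int) : Prop := out = extract_quantum_numbers_alt primitives primitive_mapping
instance (primitives : List (Int × String)) (primitive_mapping : List (String × Int × Int × Int)) (out : List Int × List Int × List Int) : Decidable (Spec_extract_quantum_numbers primitives primitive_mapping out) := by unfold Spec_extract_quantum_numbers; infer_instance

-- ===== CLAIM (what is proved, stated in full; the proofs are below) =====
def Claim_equal_extract_quantum_numbers : Prop := ∀ (primitives : List (Int × String)) (primitive_mapping : List (String × Int × Int × Int)), Dom_extract_quantum_numbers primitives primitive_mapping → Pre_extract_quantum_numbers primitives primitive_mapping → Spec_extract_quantum_numbers primitives primitive_mapping (extract_quantum_numbers primitives primitive_mapping)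

-- ===== LEMMAS AND PROOFS =====

-- A's three-accumulator fold, started from arbitrary accumulators, appends the three
-- per-component columns of the mapped triples.
theorem pv_foldA (pm : List (String × Int × Int × Int)) (l : List (Int × String))
    (a b c : List Int) :
    l.foldl
      (fun acc item =>
        let lmn := ((PySem.Dict.mk pm).get? item.2).getD (0, 0, 0)
        (acc.1 ++ [lmn.1], acc.2.1 ++ [lmn.2.1], acc.2.2 ++ [lmn.2.2]))
      (a, b, c)
    = (a ++ pvColumn l pm 0, b ++ pvColumn l pm 1, c ++ pvColumn l pm 2) := by
  induction l generalizing a b c with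
  | nil => simp [pvColumn]
  | cons hd tl ih => simp [List.foldl_cons, ih, pvColumn]

-- ===== VERDICT (by name: the statement is the Claim_ definition above) =====
theorem extract_quantum_numbers_spec : Claim_equal_extract_quantum_numbers := by
  intro primitives primitive_mapping _ _
  unfold Spec_extract_quantum_numbers extract_quantum_numbers extract_quantum_numbers_alt
  rw [pv_foldA]
  simp
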